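-- pv_equiv track=rewrite | github.com/1r0nw1ll/quantum-arithmetic-research | qa_finance_transition_structure.py | orbit_family_mod
-- ===== SOURCE A (Python) =====
-- def orbit_family_mod(b: int, e: int, m: int) -> str:
--     """Classify (b,e) orbit family via orbit length."""
--     seen = set()
--     cb, ce = b, e
--     for _ in range(m * m + 1):
--         if (cb, ce) in seen:
--             break
--         seen.add((cb, ce))
--         cb, ce = ce, (cb + ce) % m
--     length = len(seen)
--     if length == 1:
--         return "singularity"
--     max_len = max(24, m * 2)  # cosmos orbits are longest
--     if length >= max_len - 2:
--         return "cosmos"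
--     return "satellite"
-- ===== SOURCE B (Python) =====
-- def orbit_family_mod(b: int, e: int, m: int) -> str:
--     # The step map (x, y) -> (y, (x+y) % m) is a bijection on pairs reduced mod m,
--     # so after two steps the state lies on its cycle: walk that cycle once to get
--     # its length, then add the (at most two) initial tail states not on the cycle.
--     def step(x, y):
--         return y, (x + y) % m
--     s0 = (b, e)
--     s1 = step(*s0)
--     s2 = step(*s1)
--     cycle = {s2}
--     cur = step(*s2)
--     while cur != s2:
--         cycle.add(cur)
--         cur = step(*cur)
--     length = len(cycle)
--     if s1 not in cycle:
--         length += 1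
--     if s0 not in cycle and s0 != s1:
--         length += 1
--     if length == 1:
--         return "singularity"
--     if length >= max(24, 2 * m) - 2:
--         return "cosmos"
--     return "satellite"
-- ===== Notes on version B (the rewrite author's own statement) =====
-- stated objective: alternative
-- what changed: A stores every visited state in a set and stops at the first repeat; B instead uses that the step map is a bijection on pairs reduced mod m, so the twice-stepped state already lies on its cycle: B walks that cycle once to get its length and then adds the at most two initial tail states not on the cycle.
import Mathlib
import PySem

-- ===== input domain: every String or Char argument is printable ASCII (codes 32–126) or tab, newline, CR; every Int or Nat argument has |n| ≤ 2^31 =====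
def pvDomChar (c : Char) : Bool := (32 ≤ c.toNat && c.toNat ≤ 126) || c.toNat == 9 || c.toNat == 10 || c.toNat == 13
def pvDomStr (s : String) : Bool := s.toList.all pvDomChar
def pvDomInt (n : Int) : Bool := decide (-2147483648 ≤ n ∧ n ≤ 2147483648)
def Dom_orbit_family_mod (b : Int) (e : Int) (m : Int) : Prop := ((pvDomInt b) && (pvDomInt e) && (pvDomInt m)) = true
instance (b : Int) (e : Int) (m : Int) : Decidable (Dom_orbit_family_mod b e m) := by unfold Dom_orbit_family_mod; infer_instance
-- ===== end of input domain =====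

-- B replaces A's generic first-repeat detection (a set of all visited states) by a one-pass
-- walk of the cycle of the twice-stepped state plus two O(1) tail checks ("alternative").

-- ===== PORT A =====
-- the for-loop over range(m*m+1) with its break, seen-set and state update, step for step.
-- Python's 'seen' set is ported as a Std.HashSet: only membership and len(seen) are consumed
-- (no iteration order), and the hash set is exact as a finite set while keeping Python's O(1)
-- membership cost (the orbit can hold ~m*m states, so a list-backed set is not evaluable)
def pvLoopA (m : Int) : Nat → Int × Int → Std.HashSet (Int × Int) → Std.HashSet (Int × Int)
  | 0, _, seen => seen
  | n+1, s, seen =>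
    if s ∈ seen then seen
    else pvLoopA m n (s.2, PySem.Int.mod (s.1 + s.2) m) (seen.insert s)

def orbit_family_mod (b : Int) (e : Int) (m : Int) : String :=
  let seen := pvLoopA m (m * m + 1).toNat (b, e) ∅
  let length : Int := seen.size
  if length = 1 then "singularity"
  else
    let maxLen := max 24 (m * 2)
    if maxLen - 2 ≤ length then "cosmos" else "satellite"

-- ===== PORT B =====
def pvStepB (m : Int) (s : Int × Int) : Int × Int := (s.2, PySem.Int.mod (s.1 + s.2) m)

-- the while-loop of Source B; the fuel (m*m).toNat only guards totality: for m ≠ 0 the cycle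
-- of the (reduced) start state closes within m*m steps, so the fuel is never exhausted
-- the 'cycle' set, like A's 'seen', is a Std.HashSet (membership and len only)
def pvLoopB (m : Int) (s2 : Int × Int) : Nat → Int × Int → Std.HashSet (Int × Int) → Std.HashSet (Int × Int)
  | 0, _, cyc => cyc
  | n+1, cur, cyc =>
    if cur = s2 then cyc
    else pvLoopB m s2 n (pvStepB m cur) (cyc.insert cur)

def orbit_family_mod_alt (b : Int) (e : Int) (m : Int) : String :=
  let s0 : Int × Int := (b, e)
  let s1 := pvStepB m s0
  let s2 := pvStepB m s1
  let cyc := pvLoopB m s2 (m * m).toNat (pvStepB m s2) ((∅ : Std.HashSet (Int × Int)).insert s2)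
  let l0 : Int := cyc.size
  let l1 : Int := if s1 ∈ cyc then l0 else l0 + 1
  let length : Int := if s0 ∉ cyc ∧ s0 ≠ s1 then l1 + 1 else l1
  if length = 1 then "singularity"
  else if max 24 (2 * m) - 2 ≤ length then "cosmos" else "satellite"

-- ===== PRECONDITION & SPEC =====
-- Pre_ excludes exactly m = 0, on which A raises ZeroDivisionError at the first '% m'.
def Pre_orbit_family_mod (b : Int) (e : Int) (m : Int) : Prop := m ≠ 0
instance (b : Int) (e : Int) (m : Int) : Decidable (Pre_orbit_family_mod b e m) := by unfold Pre_orbit_family_mod; infer_instance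
def pvWitness_orbit_family_mod : Int × Int × Int := (1, 2, 5)

def Spec_orbit_family_mod (b : Int) (e : Int) (m : Int) (out : String) : Prop := out = orbit_family_mod_alt b e m
instance (b : Int) (e : Int) (m : Int) (out : String) : Decidable (Spec_orbit_family_mod b e m out) := by unfold Spec_orbit_family_mod; infer_instance

-- ===== CLAIM (what is proved, stated in full; the proofs are below) =====
def Claim_equal_orbit_family_mod : Prop := ∀ (b : Int) (e : Int) (m : Int), Dom_orbit_family_mod b e m → Pre_orbit_family_mod b e m → Spec_orbit_family_mod b e m (orbit_family_mod b e m)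

-- ===== LEMMAS AND PROOFS =====

-- `s` is a pair both of whose coordinates are reduced mod m
def pvRed (m : Int) (s : Int × Int) : Prop :=
  PySem.Int.mod s.1 m = s.1 ∧ PySem.Int.mod s.2 m = s.2

-- least period of s under the step map (0 if none exists; under pvRed and m ≠ 0 one exists)
noncomputable def pvLam (m : Int) (s : Int × Int) : Nat :=
  sInf {k | 0 < k ∧ (pvStepB m)^[k] s = s}

-- the cycle of s, listed from s
noncomputable def pvC (m : Int) (s : Int × Int) : List (Int × Int) :=
  (List.range (pvLam m s)).map (fun k => (pvStepB m)^[k] s)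

theorem pvmod_dvd (m a : Int) : m ∣ (a - PySem.Int.mod a m) := by
  have h := PySem.Int.floordiv_mul_add_mod a m
  exact ⟨PySem.Int.floordiv a m, by linarith⟩

theorem pvmod_uniq {m : Int} (hm : m ≠ 0) {a b : Int} (h : m ∣ (a - b)) :
    PySem.Int.mod a m = PySem.Int.mod b m := by
  have hda := pvmod_dvd m a
  have hdb := pvmod_dvd m b
  have hd : m ∣ (PySem.Int.mod a m - PySem.Int.mod b m) := by
    have : PySem.Int.mod a m - PySem.Int.mod b m
        = (a - b) - (a - PySem.Int.mod a m) + (b - PySem.Int.mod b m) := by ring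
    rw [this]
    exact dvd_add (dvd_sub h hda) hdb
  have habs : |PySem.Int.mod a m - PySem.Int.mod b m| < |m| := by
    rcases lt_or_gt_of_ne hm with hneg | hpos
    · have ha := PySem.Int.mod_neg_bounds a hneg
      have hb := PySem.Int.mod_neg_bounds b hneg
      rw [abs_of_neg hneg]; rw [abs_lt]; omega
    · have ha1 := PySem.Int.mod_nonneg a hpos
      have ha2 := PySem.Int.mod_lt a hpos
      have hb1 := PySem.Int.mod_nonneg b hpos
      have hb2 := PySem.Int.mod_lt b hpos
      rw [abs_of_pos hpos]; rw [abs_lt]; omega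
  have := Int.eq_zero_of_abs_lt_dvd ((abs_dvd m _).mpr hd) habs
  omega

theorem pvmod_idem {m : Int} (hm : m ≠ 0) (a : Int) :
    PySem.Int.mod (PySem.Int.mod a m) m = PySem.Int.mod a m := by
  have h1 : m ∣ (PySem.Int.mod a m - a) := by
    have h := pvmod_dvd m a
    have : PySem.Int.mod a m - a = -(a - PySem.Int.mod a m) := by ring
    rw [this]; exact dvd_neg.mpr h
  exact pvmod_uniq hm h1

theorem pvmod_cancel {m : Int} (hm : m ≠ 0) {x y c : Int}
    (h : PySem.Int.mod (x + c) m = PySem.Int.mod (y + c) m) :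
    PySem.Int.mod x m = PySem.Int.mod y m := by
  apply pvmod_uniq hm
  have hdx := pvmod_dvd m (x + c)
  have hdy := pvmod_dvd m (y + c)
  have : x - y = ((x + c) - PySem.Int.mod (x + c) m) - ((y + c) - PySem.Int.mod (y + c) m)
      + (PySem.Int.mod (x + c) m - PySem.Int.mod (y + c) m) := by ring
  rw [this, h]
  have : x + c - PySem.Int.mod (y + c) m - (y + c - PySem.Int.mod (y + c) m)
      + (PySem.Int.mod (y + c) m - PySem.Int.mod (y + c) m) = x - y := by ring
  rw [← h] at this ⊢
  rw [sub_self, add_zero]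
  exact dvd_sub hdx (by rw [h]; exact hdy)

theorem pvred_step {m : Int} (hm : m ≠ 0) {s : Int × Int} (h : pvRed m s) :
    pvRed m (pvStepB m s) := by
  exact ⟨h.2, pvmod_idem hm _⟩

theorem pvred_step2 {m : Int} (hm : m ≠ 0) (s : Int × Int) :
    pvRed m (pvStepB m (pvStepB m s)) := by
  exact ⟨pvmod_idem hm _, pvmod_idem hm _⟩

theorem pvred_iter {m : Int} (hm : m ≠ 0) {s : Int × Int} (h : pvRed m s) (k : Nat) :
    pvRed m ((pvStepB m)^[k] s) := by
  induction k with
  | zero => exact h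
  | succ n ih => rw [Function.iterate_succ_apply']; exact pvred_step hm ih

theorem pvstep_inj {m : Int} (hm : m ≠ 0) {s t : Int × Int}
    (hs : pvRed m s) (ht : pvRed m t) (h : pvStepB m s = pvStepB m t) : s = t := by
  have h2 : s.2 = t.2 := congrArg Prod.fst h
  have hmods : PySem.Int.mod (s.1 + s.2) m = PySem.Int.mod (t.1 + t.2) m := congrArg Prod.snd h
  rw [h2] at hmods
  have h1 : PySem.Int.mod s.1 m = PySem.Int.mod t.1 m := pvmod_cancel hm hmods
  rw [hs.1, ht.1] at h1
  exact Prod.ext h1 h2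

theorem pviter_inj {m : Int} (hm : m ≠ 0) (k : Nat) {x y : Int × Int}
    (hx : pvRed m x) (hy : pvRed m y) (h : (pvStepB m)^[k] x = (pvStepB m)^[k] y) : x = y := by
  induction k generalizing x y with
  | zero => exact h
  | succ n ih =>
    rw [Function.iterate_succ_apply, Function.iterate_succ_apply] at h
    exact pvstep_inj hm hx hy (ih (pvred_step hm hx) (pvred_step hm hy) h)

theorem pvlam_exists {m : Int} (hm : m ≠ 0) {s : Int × Int} (hs : pvRed m s) :
    ∃ k, 0 < k ∧ k ≤ (m * m).toNat ∧ (pvStepB m)^[k] s = s := by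
  -- all iterates lie in the finite set of reduced pairs, of size (m*m).toNat
  set I : Finset Int := if 0 < m then Finset.Ico 0 m else Finset.Ioc m 0 with hI
  have hmemI : ∀ a : Int, PySem.Int.mod a m = a → a ∈ I := by
    intro a ha
    rcases lt_or_gt_of_ne hm with hneg | hpos
    · have hb := PySem.Int.mod_neg_bounds a hneg
      rw [ha] at hb
      simp only [hI, if_neg (by omega : ¬ 0 < m), Finset.mem_Ioc]
      omega
    · have h1 := PySem.Int.mod_nonneg a hpos
      have h2 := PySem.Int.mod_lt a hpos
      rw [ha] at h1 h2
      simp only [hI, if_pos hpos, Finset.mem_Ico]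
      omega
  have hcardI : I.card = m.natAbs := by
    rcases lt_or_gt_of_ne hm with hneg | hpos
    · simp only [hI, if_neg (by omega : ¬ 0 < m)]
      rw [Int.card_Ioc]; omega
    · simp only [hI, if_pos hpos]
      rw [Int.card_Ico]; omega
  set T : Finset (Int × Int) := I ×ˢ I with hT
  have hcardT : T.card = (m * m).toNat := by
    rw [hT, Finset.card_product, hcardI]
    have : m * m = (m.natAbs : Int) * (m.natAbs : Int) := by
      rw [← Int.natAbs_mul_self]; push_cast; ring
    omega
  have hmaps : ∀ i ∈ Finset.range (T.card + 1), (pvStepB m)^[i] s ∈ T := by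
    intro i _
    have hred := pvred_iter hm hs i
    exact Finset.mem_product.mpr ⟨hmemI _ hred.1, hmemI _ hred.2⟩
  obtain ⟨i, hi, j, hj, hne, heq⟩ :=
    Finset.exists_ne_map_eq_of_card_lt_of_maps_to (by rw [Finset.card_range]; omega) hmaps
  rw [Finset.mem_range] at hi hj
  -- wlog i < j
  rcases lt_or_gt_of_ne hne with hlt | hlt
  · refine ⟨j - i, by omega, by omega, ?_⟩
    have : (pvStepB m)^[i] ((pvStepB m)^[j - i] s) = (pvStepB m)^[i] s := by
      rw [← Function.iterate_add_apply]
      rw [(by omega : i + (j - i) = j)]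
      exact heq.symm
    exact pviter_inj hm i (pvred_iter hm hs _) hs this
  · refine ⟨i - j, by omega, by omega, ?_⟩
    have : (pvStepB m)^[j] ((pvStepB m)^[i - j] s) = (pvStepB m)^[j] s := by
      rw [← Function.iterate_add_apply]
      rw [(by omega : j + (i - j) = i)]
      exact heq
    exact pviter_inj hm j (pvred_iter hm hs _) hs this

theorem pvlam_pos {m : Int} (hm : m ≠ 0) {s : Int × Int} (hs : pvRed m s) :
    0 < pvLam m s ∧ (pvStepB m)^[pvLam m s] s = s ∧ pvLam m s ≤ (m * m).toNat := by
  obtain ⟨k, hk0, hkle, hkper⟩ := pvlam_exists hm hs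
  have hne : {k | 0 < k ∧ (pvStepB m)^[k] s = s}.Nonempty := ⟨k, hk0, hkper⟩
  have hmem := Nat.sInf_mem hne
  have hle : sInf {k | 0 < k ∧ (pvStepB m)^[k] s = s} ≤ k := Nat.sInf_le ⟨hk0, hkper⟩
  simp only [Set.mem_setOf_eq] at hmem
  unfold pvLam
  exact ⟨hmem.1, hmem.2, le_trans hle hkle⟩

theorem pvlam_min {m : Int} {s : Int × Int} {k : Nat} (hk0 : 0 < k) (hklt : k < pvLam m s) :
    (pvStepB m)^[k] s ≠ s := by
  intro hper
  have hle := Nat.sInf_le (show k ∈ {k | 0 < k ∧ (pvStepB m)^[k] s = s} from ⟨hk0, hper⟩)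
  unfold pvLam at hklt
  omega

theorem pvmem_C {m : Int} {s x : Int × Int} :
    x ∈ pvC m s ↔ ∃ k, k < pvLam m s ∧ (pvStepB m)^[k] s = x := by
  simp only [pvC, List.mem_map, List.mem_range]

theorem pviter_inj_range {m : Int} (hm : m ≠ 0) {s : Int × Int} (hs : pvRed m s)
    {i j : Nat} (hi : i < pvLam m s) (hj : j < pvLam m s)
    (h : (pvStepB m)^[i] s = (pvStepB m)^[j] s) : i = j := by
  rcases Nat.lt_trichotomy i j with hlt | heq | hlt
  · exfalso
    have hstep : (pvStepB m)^[i] ((pvStepB m)^[j - i] s) = (pvStepB m)^[i] s := by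
      rw [← Function.iterate_add_apply, (by omega : i + (j - i) = j)]; exact h.symm
    exact pvlam_min (by omega) (by omega)
      (pviter_inj hm i (pvred_iter hm hs _) hs hstep)
  · exact heq
  · exfalso
    have hstep : (pvStepB m)^[j] ((pvStepB m)^[i - j] s) = (pvStepB m)^[j] s := by
      rw [← Function.iterate_add_apply, (by omega : j + (i - j) = i)]; exact h
    exact pvlam_min (by omega) (by omega)
      (pviter_inj hm j (pvred_iter hm hs _) hs hstep)

theorem pvred_of_mem_C {m : Int} (hm : m ≠ 0) {s x : Int × Int} (hs : pvRed m s)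
    (hx : x ∈ pvC m s) : pvRed m x := by
  obtain ⟨k, _, rfl⟩ := pvmem_C.mp hx
  exact pvred_iter hm hs k

theorem pvC_closed {m : Int} (hm : m ≠ 0) {s x : Int × Int} (hs : pvRed m s)
    (hx : x ∈ pvC m s) : pvStepB m x ∈ pvC m s := by
  obtain ⟨k, hk, rfl⟩ := pvmem_C.mp hx
  have hstep : pvStepB m ((pvStepB m)^[k] s) = (pvStepB m)^[k + 1] s :=
    (Function.iterate_succ_apply' _ _ _).symm
  rcases Nat.lt_or_ge (k + 1) (pvLam m s) with hlt | hge
  · exact pvmem_C.mpr ⟨k + 1, hlt, hstep.symm⟩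
  · have hk1 : k + 1 = pvLam m s := by omega
    have hper := (pvlam_pos hm hs).2.1
    have hpos := (pvlam_pos hm hs).1
    rw [hstep, hk1, hper]
    exact pvmem_C.mpr ⟨0, hpos, rfl⟩

theorem pvC_period {m : Int} (hm : m ≠ 0) {s x : Int × Int} (hs : pvRed m s)
    (hx : x ∈ pvC m s) : (pvStepB m)^[pvLam m s] x = x := by
  obtain ⟨a, _, rfl⟩ := pvmem_C.mp hx
  rw [← Function.iterate_add_apply, Nat.add_comm, Function.iterate_add_apply,
    (pvlam_pos hm hs).2.1]

theorem pvloopB_inv {m : Int} (hm : m ≠ 0) {s2 : Int × Int} (hs : pvRed m s2) :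
    ∀ (fuel j : Nat) (h : Std.HashSet (Int × Int)), 1 ≤ j → j ≤ pvLam m s2 →
    pvLam m s2 - j ≤ fuel →
    (∀ x, x ∈ h ↔ x ∈ (List.range j).map (fun k => (pvStepB m)^[k] s2)) → h.size = j →
    (∀ x, x ∈ pvLoopB m s2 fuel ((pvStepB m)^[j] s2) h ↔ x ∈ pvC m s2)
      ∧ (pvLoopB m s2 fuel ((pvStepB m)^[j] s2) h).size = pvLam m s2 := by
  intro fuel
  induction fuel with
  | zero =>
    intro j h h1 hle hfuel hmem hsize
    have hj : j = pvLam m s2 := by omega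
    subst hj
    exact ⟨by intro x; rw [pvLoopB, hmem x]; rfl, by rw [pvLoopB, hsize]⟩
  | succ n ih =>
    intro j h h1 hle hfuel hmem hsize
    by_cases hcur : (pvStepB m)^[j] s2 = s2
    · have hj : j = pvLam m s2 := by
        rcases Nat.lt_or_ge j (pvLam m s2) with hlt | _
        · exact absurd hcur (pvlam_min (by omega) hlt)
        · omega
      subst hj
      refine ⟨fun x => ?_, ?_⟩
      · rw [pvLoopB, if_pos hcur, hmem x]; rfl
      · rw [pvLoopB, if_pos hcur, hsize]
    · have hjlt : j < pvLam m s2 := by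
        rcases Nat.lt_or_ge j (pvLam m s2) with hlt | hge
        · exact hlt
        · exact absurd (by rw [(by omega : j = pvLam m s2)]; exact (pvlam_pos hm hs).2.1) hcur
      have hnotl : (pvStepB m)^[j] s2 ∉ (List.range j).map (fun k => (pvStepB m)^[k] s2) := by
        intro hmem'
        obtain ⟨k, hk, hkeq⟩ := List.mem_map.mp hmem'
        rw [List.mem_range] at hk
        have := pviter_inj_range hm hs (by omega) hjlt hkeq
        omega
      have hnot : (pvStepB m)^[j] s2 ∉ h := fun hc => hnotl ((hmem _).mp hc)
      have hstep : pvStepB m ((pvStepB m)^[j] s2) = (pvStepB m)^[j + 1] s2 :=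
        (Function.iterate_succ_apply' _ _ _).symm
      have hmem' : ∀ x, x ∈ h.insert ((pvStepB m)^[j] s2)
          ↔ x ∈ (List.range (j + 1)).map (fun k => (pvStepB m)^[k] s2) := by
        intro x
        rw [Std.HashSet.mem_insert, List.range_succ, List.map_append, List.mem_append, hmem x]
        rw [beq_iff_eq]
        constructor
        · rintro (rfl | hx)
          · exact Or.inr (by simp)
          · exact Or.inl hx
        · rintro (hx | hx)
          · exact Or.inr hx
          · simp at hx
            exact Or.inl hx.symm
      have hsize' : (h.insert ((pvStepB m)^[j] s2)).size = j + 1 := by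
        rw [Std.HashSet.size_insert, if_neg hnot, hsize]
      have := ih (j + 1) (h.insert ((pvStepB m)^[j] s2)) (by omega) (by omega) (by omega)
        hmem' hsize'
      refine ⟨fun x => ?_, ?_⟩
      · rw [pvLoopB, if_neg hcur, hstep]
        exact (this.1 x)
      · rw [pvLoopB, if_neg hcur, hstep]
        exact this.2

theorem pvB_cyc {m : Int} (hm : m ≠ 0) {s2 : Int × Int} (hs : pvRed m s2) :
    (∀ x, x ∈ pvLoopB m s2 (m * m).toNat (pvStepB m s2)
        ((∅ : Std.HashSet (Int × Int)).insert s2) ↔ x ∈ pvC m s2)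
      ∧ (pvLoopB m s2 (m * m).toNat (pvStepB m s2)
        ((∅ : Std.HashSet (Int × Int)).insert s2)).size = pvLam m s2 := by
  have hpos := (pvlam_pos hm hs).1
  have hle := (pvlam_pos hm hs).2.2
  have hmem : ∀ x, x ∈ (∅ : Std.HashSet (Int × Int)).insert s2
      ↔ x ∈ (List.range 1).map (fun k => (pvStepB m)^[k] s2) := by
    intro x
    rw [Std.HashSet.mem_insert, beq_iff_eq]
    constructor
    · rintro (rfl | hx)
      · simp
      · exact absurd hx (Std.HashSet.not_mem_empty)
    · intro hx
      simp at hx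
      exact Or.inl hx.symm
  have hsize : ((∅ : Std.HashSet (Int × Int)).insert s2).size = 1 := by
    rw [Std.HashSet.size_insert, if_neg (Std.HashSet.not_mem_empty), Std.HashSet.size_empty]
  have h2 : pvStepB m s2 = (pvStepB m)^[1] s2 := by simp
  rw [h2]
  exact pvloopB_inv hm hs _ 1 _ le_rfl hpos (by omega) hmem hsize

-- number of initial states (0, 1 or 2) before the orbit of s0 enters the cycle of its
-- twice-stepped state
noncomputable def pvMu (m : Int) (s0 : Int × Int) : Nat :=
  if s0 ∈ pvC m (pvStepB m (pvStepB m s0)) then 0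
  else if pvStepB m s0 ∈ pvC m (pvStepB m (pvStepB m s0)) then 1
  else 2

theorem pvmu_cases (m : Int) (s0 : Int × Int) :
    (pvMu m s0 = 0 ∧ s0 ∈ pvC m (pvStepB m (pvStepB m s0)))
    ∨ (pvMu m s0 = 1 ∧ s0 ∉ pvC m (pvStepB m (pvStepB m s0))
        ∧ pvStepB m s0 ∈ pvC m (pvStepB m (pvStepB m s0)))
    ∨ (pvMu m s0 = 2 ∧ s0 ∉ pvC m (pvStepB m (pvStepB m s0))
        ∧ pvStepB m s0 ∉ pvC m (pvStepB m (pvStepB m s0))) := by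
  unfold pvMu
  split_ifs with h0 h1
  · exact Or.inl ⟨rfl, h0⟩
  · exact Or.inr (Or.inl ⟨rfl, h0, h1⟩)
  · exact Or.inr (Or.inr ⟨rfl, h0, h1⟩)

theorem pvmu_mem {m : Int} (hm : m ≠ 0) (s0 : Int × Int) :
    (pvStepB m)^[pvMu m s0] s0 ∈ pvC m (pvStepB m (pvStepB m s0)) := by
  have hs2 := pvred_step2 hm s0
  have hpos := (pvlam_pos hm hs2).1
  rcases pvmu_cases m s0 with ⟨hmu, hmem⟩ | ⟨hmu, _, hmem⟩ | ⟨hmu, _, _⟩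
  · rw [hmu]; simpa using hmem
  · rw [hmu]; simpa using hmem
  · rw [hmu]
    exact pvmem_C.mpr ⟨0, hpos, by simp [Function.iterate_succ_apply]⟩

theorem pvmu_min {m : Int} (s0 : Int × Int) {k : Nat} (hk : k < pvMu m s0) :
    (pvStepB m)^[k] s0 ∉ pvC m (pvStepB m (pvStepB m s0)) := by
  rcases pvmu_cases m s0 with ⟨hmu, _⟩ | ⟨hmu, h0, _⟩ | ⟨hmu, h0, h1⟩
  · omega
  · have : k = 0 := by omega
    rw [this]; simpa using h0
  · rcases (by omega : k = 0 ∨ k = 1) with rfl | rfl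
    · simpa using h0
    · simpa using h1

theorem pvseq_mem {m : Int} (hm : m ≠ 0) (s0 : Int × Int) (d : Nat) :
    (pvStepB m)^[pvMu m s0 + d] s0 ∈ pvC m (pvStepB m (pvStepB m s0)) := by
  have hs2 := pvred_step2 hm s0
  induction d with
  | zero => simpa using pvmu_mem hm s0
  | succ n ih =>
    rw [(by omega : pvMu m s0 + (n + 1) = (pvMu m s0 + n) + 1),
      Function.iterate_succ_apply']
    exact pvC_closed hm hs2 ih

-- the first pvMu + pvLam states of the orbit of s0 are pairwise distinct
theorem pvseq_ne {m : Int} (hm : m ≠ 0) (s0 : Int × Int) {i j : Nat} (hij : i < j)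
    (hj : j < pvMu m s0 + pvLam m (pvStepB m (pvStepB m s0))) :
    (pvStepB m)^[i] s0 ≠ (pvStepB m)^[j] s0 := by
  have hs2 := pvred_step2 hm s0
  set s2 := pvStepB m (pvStepB m s0) with hs2def
  intro heq
  by_cases hiC : pvMu m s0 ≤ i
  · -- both states on the cycle
    set SM := (pvStepB m)^[pvMu m s0] s0 with hSM
    have hSMC : SM ∈ pvC m s2 := pvmu_mem hm s0
    have hredSM : pvRed m SM := pvred_of_mem_C hm hs2 hSMC
    have hi' : (pvStepB m)^[i] s0 = (pvStepB m)^[i - pvMu m s0] SM := by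
      rw [hSM, ← Function.iterate_add_apply, (by omega : i - pvMu m s0 + pvMu m s0 = i)]
    have hj' : (pvStepB m)^[j] s0
        = (pvStepB m)^[i - pvMu m s0] ((pvStepB m)^[j - i] SM) := by
      rw [hSM, ← Function.iterate_add_apply, ← Function.iterate_add_apply]
      congr 1
      omega
    rw [hi', hj'] at heq
    have hSMper : (pvStepB m)^[j - i] SM = SM :=
      (pviter_inj hm (i - pvMu m s0)
        (pvred_iter hm hredSM _) hredSM heq.symm)
    obtain ⟨a, ha, hSMeq⟩ := pvmem_C.mp hSMC
    rw [← hSMeq] at hSMper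
    have : (pvStepB m)^[a] ((pvStepB m)^[j - i] s2) = (pvStepB m)^[a] s2 := by
      rw [← Function.iterate_add_apply, Nat.add_comm, Function.iterate_add_apply]
      exact hSMper
    have hper := pviter_inj hm a (pvred_iter hm hs2 _) hs2 this
    exact pvlam_min (by omega) (by omega) hper
  · by_cases hjC : pvMu m s0 ≤ j
    · have hjmem : (pvStepB m)^[j] s0 ∈ pvC m s2 := by
        have := pvseq_mem hm s0 (j - pvMu m s0)
        rwa [(by omega : pvMu m s0 + (j - pvMu m s0) = j)] at this
      have himem : (pvStepB m)^[i] s0 ∉ pvC m s2 := pvmu_min s0 (by omega)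
      rw [heq] at himem
      exact himem hjmem
    · -- i < j < pvMu ≤ 2, so i = 0, j = 1
      have hmu2 : pvMu m s0 = 2 := by
        have : pvMu m s0 ≤ 2 := by unfold pvMu; split_ifs <;> omega
        omega
      have hi0 : i = 0 := by omega
      have hj1 : j = 1 := by omega
      rw [hi0, hj1] at heq
      simp only [Function.iterate_zero_apply, Function.iterate_one] at heq
      -- s0 = step s0 forces step s0 = s2 ∈ C, contradicting pvMu = 2
      have hs1C : pvStepB m s0 ∈ pvC m s2 := by
        have hpos := (pvlam_pos hm hs2).1
        have : pvStepB m s0 = s2 := by rw [hs2def]; exact congrArg (pvStepB m) heq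
        rw [this]
        exact pvmem_C.mpr ⟨0, hpos, rfl⟩
      rcases pvmu_cases m s0 with ⟨hmu, _⟩ | ⟨hmu, _, _⟩ | ⟨_, _, h1'⟩ <;>
        first | omega | exact h1' hs1C

theorem pvseq_repeat {m : Int} (hm : m ≠ 0) (s0 : Int × Int) :
    (pvStepB m)^[pvMu m s0 + pvLam m (pvStepB m (pvStepB m s0))] s0
      = (pvStepB m)^[pvMu m s0] s0 := by
  have hs2 := pvred_step2 hm s0
  rw [Nat.add_comm, Function.iterate_add_apply]
  exact pvC_period hm hs2 (pvmu_mem hm s0)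

theorem pvloopA_step (m : Int) (x : Int × Int) :
    (x.2, PySem.Int.mod (x.1 + x.2) m) = pvStepB m x := rfl

theorem pvloopA_inv {m : Int} (hm : m ≠ 0) (s0 : Int × Int) :
    ∀ (fuel j : Nat) (h : Std.HashSet (Int × Int)),
    j ≤ pvMu m s0 + pvLam m (pvStepB m (pvStepB m s0)) →
    (∀ x, x ∈ h ↔ x ∈ (List.range j).map (fun k => (pvStepB m)^[k] s0)) → h.size = j →
    (pvLoopA m fuel ((pvStepB m)^[j] s0) h).size
      = min (pvMu m s0 + pvLam m (pvStepB m (pvStepB m s0))) (j + fuel) := by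
  set ρ := pvMu m s0 + pvLam m (pvStepB m (pvStepB m s0)) with hρ
  intro fuel
  induction fuel with
  | zero =>
    intro j h hj hmem hsize
    rw [pvLoopA, hsize, Nat.add_zero, min_eq_right hj]
  | succ n ih =>
    intro j h hj hmem hsize
    by_cases hjρ : j = ρ
    · have hmeml : (pvStepB m)^[j] s0 ∈ (List.range j).map (fun k => (pvStepB m)^[k] s0) := by
        apply List.mem_map.mpr
        refine ⟨pvMu m s0, ?_, ?_⟩
        · rw [List.mem_range]
          have := (pvlam_pos hm (pvred_step2 hm s0)).1
          omega
        · rw [hjρ]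
          exact (pvseq_repeat hm s0).symm
      rw [pvLoopA, if_pos ((hmem _).mpr hmeml), hsize, min_eq_left (by omega), hjρ]
    · have hjlt : j < ρ := by omega
      have hnotl : (pvStepB m)^[j] s0 ∉ (List.range j).map (fun k => (pvStepB m)^[k] s0) := by
        intro hmem'
        obtain ⟨k, hk, hkeq⟩ := List.mem_map.mp hmem'
        rw [List.mem_range] at hk
        exact pvseq_ne hm s0 hk hjlt hkeq
      have hnot : (pvStepB m)^[j] s0 ∉ h := fun hc => hnotl ((hmem _).mp hc)
      have hmem' : ∀ x, x ∈ h.insert ((pvStepB m)^[j] s0)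
          ↔ x ∈ (List.range (j + 1)).map (fun k => (pvStepB m)^[k] s0) := by
        intro x
        rw [Std.HashSet.mem_insert, List.range_succ, List.map_append, List.mem_append, hmem x]
        rw [beq_iff_eq]
        constructor
        · rintro (rfl | hx)
          · exact Or.inr (by simp)
          · exact Or.inl hx
        · rintro (hx | hx)
          · exact Or.inr hx
          · simp at hx
            exact Or.inl hx.symm
      have hsize' : (h.insert ((pvStepB m)^[j] s0)).size = j + 1 := by
        rw [Std.HashSet.size_insert, if_neg hnot, hsize]
      rw [pvLoopA, if_neg hnot, pvloopA_step,
        (Function.iterate_succ_apply' (pvStepB m) j s0).symm]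
      rw [ih (j + 1) _ (by omega) hmem' hsize', (by omega : j + 1 + n = j + (n + 1))]

theorem pvC_of_eq {m : Int} {x y s : Int × Int} (h : x = y) (hy : y ∈ pvC m s) :
    x ∈ pvC m s := by rw [h]; exact hy

theorem pvC_self_mem {m : Int} {s : Int × Int} (hpos : 0 < pvLam m s) : s ∈ pvC m s :=
  pvmem_C.mpr ⟨0, hpos, rfl⟩

theorem pvsq_ne20 (m : Int) : m * m ≠ 20 := by
  intro h
  rcases (by omega : m ≤ -5 ∨ (-4 ≤ m ∧ m ≤ 4) ∨ 5 ≤ m) with h5 | ⟨h4a, h4b⟩ | h5 <;> nlinarith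

theorem pvsq_ne_lin (m : Int) : 2 * m ≠ m * m + 4 := by
  intro h
  nlinarith [sq_nonneg (m - 1)]

-- ===== VERDICT (by name: the statement is the Claim_ definition above) =====
theorem orbit_family_mod_spec : Claim_equal_orbit_family_mod := by
  intro b e m _ hm
  unfold Spec_orbit_family_mod
  have hm' : m ≠ 0 := hm
  have hs2red := pvred_step2 hm' ((b, e) : Int × Int)
  have hLpos := (pvlam_pos hm' hs2red).1
  have hLle := (pvlam_pos hm' hs2red).2.2
  have hμle : pvMu m (b, e) ≤ 2 := by unfold pvMu; split_ifs <;> omega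
  set q := m * m with hq
  have hqnn : (0:Int) ≤ q := mul_self_nonneg m
  set μ := pvMu m (b, e) with hμ
  set L := pvLam m (pvStepB m (pvStepB m (b, e))) with hLdef
  set cap := (q + 1).toNat with hcap
  -- A-side: the seen set holds the first min (μ+L) cap orbit states
  have hseen : (pvLoopA m cap (b, e) (∅ : Std.HashSet (Int × Int))).size = min (μ + L) cap := by
    have h := pvloopA_inv hm' (b, e) cap 0 (∅ : Std.HashSet (Int × Int)) (by omega)
      (by intro x; simp [Std.HashSet.not_mem_empty]) Std.HashSet.size_empty
    simpa using h
  have hAeq : orbit_family_mod b e m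
      = (if ((min (μ + L) cap : Nat) : Int) = 1 then "singularity"
         else if max 24 (m * 2) - 2 ≤ ((min (μ + L) cap : Nat) : Int) then "cosmos"
         else "satellite") := by
    unfold orbit_family_mod
    rw [← hq, ← hcap]
    simp only [hseen]
  -- B-side: the cycle walk returns pvC, and the two tail checks add μ
  have hcyc := pvB_cyc hm' hs2red
  have hBeq : orbit_family_mod_alt b e m
      = (if ((μ + L : Nat) : Int) = 1 then "singularity"
         else if max 24 (2 * m) - 2 ≤ ((μ + L : Nat) : Int) then "cosmos"
         else "satellite") := by
    unfold orbit_family_mod_alt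
    simp only [hcyc.1, hcyc.2]
    have hlen : ((pvLam m (pvStepB m (pvStepB m ((b, e) : Int × Int))) : Nat) : Int) = (L : Int) := by
      rw [← hLdef]
    rcases pvmu_cases m (b, e) with ⟨hmu, h0C⟩ | ⟨hmu, h0C, h1C⟩ | ⟨hmu, h0C, h1C⟩
    · have h1C : pvStepB m (b, e) ∈ pvC m (pvStepB m (pvStepB m (b, e))) :=
        pvC_closed hm' hs2red h0C
      have hμ0 : μ = 0 := by rw [hμ, hmu]
      simp [hlen, h1C, h0C, hμ0]
    · have hne : ((b, e) : Int × Int) ≠ pvStepB m (b, e) := by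
        intro heq
        exact h0C (pvC_of_eq heq h1C)
      have hμ1 : μ = 1 := by rw [hμ, hmu]
      simp [hlen, h1C, h0C, hne, hμ1]
      rw [(by ring : (1 : Int) + (L : Int) = (L : Int) + 1)]
    · have hne : ((b, e) : Int × Int) ≠ pvStepB m (b, e) := by
        intro heq
        exact h1C (pvC_of_eq (congrArg (pvStepB m) heq) (pvC_self_mem hLpos))
      have hμ2 : μ = 2 := by rw [hμ, hmu]
      simp [hlen, h1C, h0C, hne, hμ2]
      rw [if_neg (show ¬((L : Int) + 1 = 0) from by omega),
        if_neg (show ¬((2 : Int) + (L : Int) = 1) from by omega),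
        (by ring : (2 : Int) + (L : Int) + 2 = (L : Int) + 1 + 1 + 2)]
  rw [hAeq, hBeq, (by ring : m * 2 = 2 * m)]
  by_cases hle : μ + L ≤ cap
  · rw [min_eq_left hle]
  · have hμ2 : μ = 2 ∧ L = q.toNat := by omega
    obtain ⟨hμ2, hL2⟩ := hμ2
    rw [min_eq_right (by omega)]
    have hv1 : ((cap : Nat) : Int) = q + 1 := by omega
    have hv2 : ((μ + L : Nat) : Int) = q + 2 := by omega
    rw [hv1, hv2]
    have h20 : q ≠ 20 := pvsq_ne20 m
    have hlin : 2 * m ≠ q + 4 := pvsq_ne_lin m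
    rcases max_cases 24 (2 * m) with ⟨hmax, hge⟩ | ⟨hmax, hlt⟩ <;> rw [hmax] <;>
      split_ifs <;> first | rfl | omega
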